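-- pv_equiv track=rewrite | github.com/pipalacademy/engage | engage/engage/doctype/problem_repository/problem_repository.py | is_github_username_valid
-- ===== SOURCE A (Python) =====
-- import string
--
-- def is_github_username_valid(val):
--     max_length = 39
--     allowed_chars = string.ascii_letters + string.digits + "-"
--
--     if len(val) > max_length:
--         return False
--
--     for char in val:
--         if char not in allowed_chars:
--             return False
--
--     return True
-- ===== SOURCE B (Python) =====
-- def _ok(c):
--     n = ord(c)
--     return n == 45 or 48 <= n <= 57 or 65 <= n <= 90 or 97 <= n <= 122
--
--
-- def _go(val, i, budget):
--     # consume one allowed character per unit of budget; budget 39 enforces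
--     # the length cap, so no separate length check is needed
--     if i == len(val):
--         return True
--     if budget == 0:
--         return False
--     if not _ok(val[i]):
--         return False
--     return _go(val, i + 1, budget - 1)
--
--
-- def is_github_username_valid(val):
--     return _go(val, 0, 39)
-- ===== Notes on version B (the rewrite author's own statement) =====
-- stated objective: alternative
-- what changed: Replaced the up-front length guard plus membership loop over an allowed-characters string with a single fuel-bounded recursive scan: a budget of 39 enforces the length cap while consuming characters, and the character class is decided by ord-range arithmetic instead of membership in a built alphabet string.
import Mathlib
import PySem

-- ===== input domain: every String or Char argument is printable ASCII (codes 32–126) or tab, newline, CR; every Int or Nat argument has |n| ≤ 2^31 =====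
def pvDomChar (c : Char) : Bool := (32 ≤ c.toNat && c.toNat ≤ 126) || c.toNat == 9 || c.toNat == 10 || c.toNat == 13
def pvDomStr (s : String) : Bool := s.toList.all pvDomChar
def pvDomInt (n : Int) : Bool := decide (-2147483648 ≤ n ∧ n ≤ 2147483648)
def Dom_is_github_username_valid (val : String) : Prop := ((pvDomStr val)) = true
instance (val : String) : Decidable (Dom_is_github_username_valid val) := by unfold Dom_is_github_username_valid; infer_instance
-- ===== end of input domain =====

-- B replaces A's length guard plus membership loop with one fuel-bounded recursive
-- scan: a budget of 39 enforces the length cap and ord-range arithmetic decides the class.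

-- ===== PORT A =====
-- allowed_chars = string.ascii_letters + string.digits + "-"
def pvAllowedA : List Char :=
  "abcdefghijklmnopqrstuvwxyzABCDEFGHIJKLMNOPQRSTUVWXYZ".toList ++ "0123456789".toList ++ "-".toList

-- the 'for char in val: if char not in allowed_chars: return False' loop, early return kept
def pvLoopA : List Char → Bool
  | [] => true
  | c :: cs => if !(pvAllowedA.contains c) then false else pvLoopA cs

def is_github_username_valid (val : String) : Bool :=
  if PySem.Str.len val > 39 then false
  else pvLoopA val.toList

-- ===== PORT B =====
-- _ok(c): n = ord(c); n == 45 or 48 <= n <= 57 or 65 <= n <= 90 or 97 <= n <= 122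
def pvOkB (c : Char) : Bool :=
  let n := c.toNat
  n == 45 || (48 ≤ n && n ≤ 57) || (65 ≤ n && n ≤ 90) || (97 ≤ n && n ≤ 122)

-- _go(val, i, budget), structural recursion on the remaining characters / budget
def pvGoB : List Char → Nat → Bool
  | [], _ => true
  | _ :: _, 0 => false
  | c :: cs, b + 1 => if !pvOkB c then false else pvGoB cs b

def is_github_username_valid_alt (val : String) : Bool :=
  pvGoB val.toList 39

-- ===== PRECONDITION & SPEC =====
def Spec_is_github_username_valid (val : String) (out : Bool) : Prop := out = is_github_username_valid_alt val
instance (val : String) (out : Bool) : Decidable (Spec_is_github_username_valid val out) := by unfold Spec_is_github_username_valid; infer_instance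

-- ===== CLAIM (what is proved, stated in full; the proofs are below) =====
def Claim_equal_is_github_username_valid : Prop := ∀ (val : String), Dom_is_github_username_valid val → Spec_is_github_username_valid val (is_github_username_valid val)

-- ===== LEMMAS AND PROOFS =====

-- the two character classifiers agree (on every character)
theorem pvOkB_eq_contains (c : Char) : pvOkB c = pvAllowedA.contains c := by
  have hmem : c ∈ pvAllowedA ↔ c.toNat ∈ pvAllowedA.map Char.toNat := by
    constructor
    · exact fun h => List.mem_map_of_mem h
    · intro h
      obtain ⟨d, hd, hdc⟩ := List.mem_map.mp h
      have : d = c := by rw [← Char.ofNat_toNat d, hdc, Char.ofNat_toNat]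
      exact this ▸ hd
  have hmap : pvAllowedA.map Char.toNat =
    [97,98,99,100,101,102,103,104,105,106,107,108,109,110,111,112,113,114,115,116,117,118,119,120,121,122,
     65,66,67,68,69,70,71,72,73,74,75,76,77,78,79,80,81,82,83,84,85,86,87,88,89,90,
     48,49,50,51,52,53,54,55,56,57,45] := by decide
  rw [Bool.eq_iff_iff, List.contains_eq_mem, decide_eq_true_iff, hmem, hmap]
  simp only [pvOkB, List.mem_cons, List.not_mem_nil, or_false, Bool.or_eq_true,
    Bool.and_eq_true, beq_iff_eq, decide_eq_true_iff]
  omega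

-- A's loop is an 'all characters allowed' test
theorem pvLoopA_eq_all (cs : List Char) : pvLoopA cs = cs.all (fun c => pvAllowedA.contains c) := by
  induction cs with
  | nil => rfl
  | cons c cs ih => simp [pvLoopA, ih]

-- B's fuel-bounded scan succeeds iff the list fits the budget and all characters pass
theorem pvGoB_eq (cs : List Char) (b : Nat) :
    pvGoB cs b = (decide (cs.length ≤ b) && cs.all pvOkB) := by
  induction cs generalizing b with
  | nil => simp [pvGoB]
  | cons c cs ih =>
    cases b with
    | zero => simp [pvGoB]
    | succ b =>
      by_cases h : pvOkB c = true
      · simp [pvGoB, h, ih]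
      · simp [pvGoB, h]

-- ===== VERDICT (by name: the statement is the Claim_ definition above) =====
theorem is_github_username_valid_spec : Claim_equal_is_github_username_valid := by
  intro val _
  unfold Spec_is_github_username_valid is_github_username_valid is_github_username_valid_alt
  rw [pvLoopA_eq_all, pvGoB_eq]
  rw [show pvOkB = (fun c => pvAllowedA.contains c) from funext pvOkB_eq_contains]
  have hlen : PySem.Str.len val = (val.toList.length : Int) := PySem.Str.len_eq val
  by_cases h : val.toList.length ≤ 39
  · rw [if_neg (by omega), decide_eq_true h, Bool.true_and]
  · rw [if_pos (by omega), decide_eq_false (by omega), Bool.false_and]
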